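-- pv_equiv track=rewrite | github.com/samarpro/villani-code | villani_code/patch_apply.py | _find_fuzzy_candidates
-- ===== SOURCE A (Python) =====
-- def _find_fuzzy_candidates(
--     src_lines: list[str], pattern: list[str], expected_idx: int, max_displacement: int
-- ) -> list[int]:
--     if not pattern:
--         return [expected_idx]
--     min_idx = max(0, expected_idx - max_displacement)
--     max_idx = min(len(src_lines) - len(pattern), expected_idx + max_displacement)
--     candidates: list[int] = []
--     for start in range(min_idx, max_idx + 1):
--         matched = True
--         for offset, expected in enumerate(pattern):
--             actual = src_lines[start + offset].rstrip("\n").rstrip("\r")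
--             if _normalize_whitespace(actual) != _normalize_whitespace(expected):
--                 matched = False
--                 break
--         if matched:
--             candidates.append(start)
--     return candidates
--
-- def _normalize_whitespace(value: str) -> str:
--     return "".join(value.split())
-- ===== SOURCE B (Python) =====
-- def _normalize_whitespace(value: str) -> str:
--     return "".join(value.split())
--
--
-- def _find_fuzzy_candidates(
--     src_lines: list[str], pattern: list[str], expected_idx: int, max_displacement: int
-- ) -> list[int]:
--     if not pattern:
--         return [expected_idx]
--     lo = max(0, expected_idx - max_displacement)
--     hi = min(len(src_lines) - len(pattern), expected_idx + max_displacement)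
--     # Transposed search: sweep the pattern offsets OUTERMOST, keeping the list of
--     # still-viable window starts and pruning it at each offset.  A start survives
--     # all offsets iff its whole window matches, and pruning preserves order, so the
--     # surviving list equals A's candidate list.
--     candidates = list(range(lo, hi + 1))
--     for offset, expected in enumerate(pattern):
--         if not candidates:
--             break
--         want = _normalize_whitespace(expected)
--         candidates = [
--             s
--             for s in candidates
--             if _normalize_whitespace(src_lines[s + offset].rstrip("\n").rstrip("\r"))
--             == want
--         ]
--     return candidates
-- ===== Notes on version B (the rewrite author's own statement) =====
-- stated objective: alternative
-- what changed: B transposes the loops: it sweeps pattern offsets outermost, maintaining a surviving-candidate list of window starts that is pruned at each offset (normalizing each pattern line once per offset and stopping as soon as no candidate survives), instead of A's per-window inner scan that re-normalizes the whole pattern for every start.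
import Mathlib
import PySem

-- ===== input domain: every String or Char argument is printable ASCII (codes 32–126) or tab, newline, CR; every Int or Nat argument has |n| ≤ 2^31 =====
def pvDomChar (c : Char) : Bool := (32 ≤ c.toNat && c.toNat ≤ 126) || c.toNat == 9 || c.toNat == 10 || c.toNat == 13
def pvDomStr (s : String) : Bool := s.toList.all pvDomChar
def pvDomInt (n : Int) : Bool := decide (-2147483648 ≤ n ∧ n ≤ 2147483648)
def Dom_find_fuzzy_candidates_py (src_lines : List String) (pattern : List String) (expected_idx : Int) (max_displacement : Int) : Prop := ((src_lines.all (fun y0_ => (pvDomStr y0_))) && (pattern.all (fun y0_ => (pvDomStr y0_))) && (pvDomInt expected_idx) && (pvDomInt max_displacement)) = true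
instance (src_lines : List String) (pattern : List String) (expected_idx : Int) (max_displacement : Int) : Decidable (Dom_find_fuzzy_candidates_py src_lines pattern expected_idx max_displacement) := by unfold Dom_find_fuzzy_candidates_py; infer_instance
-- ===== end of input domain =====

-- B transposes the loops: pattern offsets outermost, pruning a surviving-candidate list of
-- window starts per offset, instead of A's per-window inner scan (alternative; not claimed faster).

-- ===== PORT A =====
-- s.rstrip(c) for a single character c: drop all trailing copies of c (hand port, exact)
def pvRstrip1 (s : String) (c : Char) : String :=
  String.ofList ((s.toList.reverse.dropWhile (fun d => d == c)).reverse)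

-- _normalize_whitespace(value) = "".join(value.split())
def pvNormWS (s : String) : String := PySem.Str.join "" (PySem.Str.split₀ s)

-- inner 'for offset, expected in enumerate(pattern)' loop with its break
def pvMatchAt (src : List String) (start : Int) : List (Int × String) → Bool
  | [] => true
  | (offset, expected) :: rest =>
    -- src_lines[start+offset]: the index is in range on every reached iteration, so pyGetD is exact
    let actual := pvRstrip1 (pvRstrip1 (PySem.List.pyGetD src (start + offset) "") '\n') '\r'
    if pvNormWS actual != pvNormWS expected then false else pvMatchAt src start rest

def find_fuzzy_candidates_py (src_lines : List String) (pattern : List String) (expected_idx : Int) (max_displacement : Int) : List Int :=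
  if pattern.isEmpty then [expected_idx] else
  let min_idx : Int := max 0 (expected_idx - max_displacement)
  let max_idx : Int := min ((src_lines.length : Int) - (pattern.length : Int)) (expected_idx + max_displacement)
  (PySem.List.pyRange min_idx (max_idx + 1) 1).foldl
    (fun candidates start =>
      if pvMatchAt src_lines start (PySem.List.enumerate pattern 0) then candidates ++ [start] else candidates) []

-- ===== PORT B =====
-- normalized form of one source line: line.rstrip("\n").rstrip("\r") then whitespace-normalize
def pvNormLine (s : String) : String := pvNormWS (pvRstrip1 (pvRstrip1 s '\n') '\r')

def find_fuzzy_candidates_py_alt (src_lines : List String) (pattern : List String) (expected_idx : Int) (max_displacement : Int) : List Int :=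
  if pattern.isEmpty then [expected_idx] else
  let lo : Int := max 0 (expected_idx - max_displacement)
  let hi : Int := min ((src_lines.length : Int) - (pattern.length : Int)) (expected_idx + max_displacement)
  (PySem.List.enumerate pattern 0).foldl
    (fun candidates oe =>
      if candidates.isEmpty then candidates else       -- 'if not candidates: break'
      let want := pvNormWS oe.2
      candidates.filter (fun s => pvNormLine (PySem.List.pyGetD src_lines (s + oe.1) "") == want))
    (PySem.List.pyRange lo (hi + 1) 1)

-- ===== PRECONDITION & SPEC =====
def Spec_find_fuzzy_candidates_py (src_lines : List String) (pattern : List String) (expected_idx : Int) (max_displacement : Int) (out : List Int) : Prop := out = find_fuzzy_candidates_py_alt src_lines pattern expected_idx max_displacement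
instance (src_lines : List String) (pattern : List String) (expected_idx : Int) (max_displacement : Int) (out : List Int) : Decidable (Spec_find_fuzzy_candidates_py src_lines pattern expected_idx max_displacement out) := by unfold Spec_find_fuzzy_candidates_py; infer_instance

-- ===== CLAIM (what is proved, stated in full; the proofs are below) =====
def Claim_equal_find_fuzzy_candidates_py : Prop := ∀ (src_lines : List String) (pattern : List String) (expected_idx : Int) (max_displacement : Int), Dom_find_fuzzy_candidates_py src_lines pattern expected_idx max_displacement → Spec_find_fuzzy_candidates_py src_lines pattern expected_idx max_displacement (find_fuzzy_candidates_py src_lines pattern expected_idx max_displacement)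

-- ===== LEMMAS AND PROOFS =====

-- the 'break' guard is redundant for the value: filtering the empty list is the empty list
theorem pv_guard_filter (cands : List Int) (f : Int → Bool) :
    (if cands.isEmpty then cands else cands.filter f) = cands.filter f := by
  cases cands <;> simp

-- B's staged pruning over the offset list equals one filter by the conjunction of all offset tests
theorem pv_foldl_filter (pred : Int → String → Int → Bool) :
    ∀ (l : List (Int × String)) (init : List Int),
    l.foldl (fun cands oe => if cands.isEmpty then cands else
        cands.filter (fun s => pred oe.1 oe.2 s)) init
      = init.filter (fun s => l.all (fun oe => pred oe.1 oe.2 s)) := by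
  intro l
  induction l with
  | nil => simp
  | cons x xs ih =>
    intro init
    rw [List.foldl_cons, pv_guard_filter, ih, List.filter_filter]
    simp [Bool.and_comm]

-- A's break-loop over enumerate is exactly the 'all offsets match' predicate
theorem pv_matchAt_all (src : List String) (start : Int) (l : List (Int × String)) :
    pvMatchAt src start l =
      l.all (fun oe => pvNormLine (PySem.List.pyGetD src (start + oe.1) "") == pvNormWS oe.2) := by
  induction l with
  | nil => rfl
  | cons x xs ih =>
    obtain ⟨o, e⟩ := x
    show (if pvNormWS (pvRstrip1 (pvRstrip1 (PySem.List.pyGetD src (start + o) "") '\n') '\r') != pvNormWS e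
          then false else pvMatchAt src start xs) = _
    rw [List.all_cons, ih]
    unfold pvNormLine
    cases h : (pvNormWS (pvRstrip1 (pvRstrip1 (PySem.List.pyGetD src (start + o) "") '\n') '\r') == pvNormWS e) with
    | false => rw [bne, h]; rfl
    | true => rw [bne, h]; rfl

-- ===== VERDICT (by name: the statement is the Claim_ definition above) =====
theorem find_fuzzy_candidates_py_spec : Claim_equal_find_fuzzy_candidates_py := by
  intro src pat e md _
  unfold Spec_find_fuzzy_candidates_py find_fuzzy_candidates_py find_fuzzy_candidates_py_alt
  by_cases hp : pat.isEmpty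
  · simp [hp]
  · simp only [hp]
    rw [PySem.List.foldl_append_if_eq_filter, List.nil_append,
        pv_foldl_filter (fun o p s => pvNormLine (PySem.List.pyGetD src (s + o) "") == pvNormWS p)]
    apply List.filter_congr
    intro s _
    rw [pv_matchAt_all]
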